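-- pv_equiv track=rewrite | github.com/janbraitinger/netflow-duplication-recognizer-prototype | distance.py | seperateInLists
-- ===== SOURCE A (Python) =====
-- def seperateInLists(data):
--     listA = []
--     listB = []
--     i = 0
--     for key, loc in data.items():
--         for vector in loc:
--             if i == 0:
--                 listA.append(vector)
--             if i == 1:
--                 listB.append(vector)
--         i += 1
--     if len(listA) >= len(listB):
--         return listA, listB
--
--     return listB, listA
-- ===== SOURCE B (Python) =====
-- def seperateInLists(data):
--     vals = list(data.values())
--     listA = list(vals[0]) if len(vals) >= 1 else []
--     listB = list(vals[1]) if len(vals) >= 2 else []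
--     if len(listA) >= len(listB):
--         return listA, listB
--     return listB, listA
-- ===== Notes on version B (the rewrite author's own statement) =====
-- stated objective: simpler
-- what changed: B replaces the counter-indexed double loop over all dict items with direct positional access to the first two value-lists (list(data.values())[0]/[1], copied), keeping the final length-based swap.
import Mathlib
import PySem

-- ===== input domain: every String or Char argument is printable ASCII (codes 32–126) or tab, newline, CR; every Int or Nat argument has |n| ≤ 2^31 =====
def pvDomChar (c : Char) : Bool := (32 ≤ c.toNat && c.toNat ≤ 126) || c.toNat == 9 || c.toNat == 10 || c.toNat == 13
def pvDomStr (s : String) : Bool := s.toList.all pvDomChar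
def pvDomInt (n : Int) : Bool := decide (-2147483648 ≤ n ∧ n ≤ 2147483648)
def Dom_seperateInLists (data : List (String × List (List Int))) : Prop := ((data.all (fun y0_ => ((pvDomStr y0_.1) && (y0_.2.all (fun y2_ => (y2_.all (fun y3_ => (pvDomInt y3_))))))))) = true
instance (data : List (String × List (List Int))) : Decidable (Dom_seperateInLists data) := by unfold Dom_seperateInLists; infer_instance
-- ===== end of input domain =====

-- B replaces A's counter-indexed double loop over all dict items with direct positional
-- access to the first two value-lists; objective: simpler.

-- ===== PORT A =====
-- inner loop body: "for vector in loc: if i == 0: listA.append(vector); if i == 1: listB.append(vector)"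
def pvStepInner (i : Int) (p : List (List Int) × List (List Int)) (v : List Int) :
    List (List Int) × List (List Int) :=
  ((if i = 0 then p.1 ++ [v] else p.1), (if i = 1 then p.2 ++ [v] else p.2))

-- outer loop body: run the inner loop over the entry's value, then "i += 1"
def pvStepOuter (st : (List (List Int) × List (List Int)) × Int)
    (kv : String × List (List Int)) : (List (List Int) × List (List Int)) × Int :=
  (kv.2.foldl (pvStepInner st.2) st.1, st.2 + 1)

def seperateInLists (data : List (String × List (List Int))) : List (List Int) × List (List Int) :=
  let r := data.foldl pvStepOuter (([], []), 0)
  let listA := r.1.1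
  let listB := r.1.2
  if listA.length ≥ listB.length then (listA, listB) else (listB, listA)

-- ===== PORT B =====
def seperateInLists_alt (data : List (String × List (List Int))) : List (List Int) × List (List Int) :=
  let vals := data.map Prod.snd
  let listA := vals.getD 0 []
  let listB := vals.getD 1 []
  if listA.length ≥ listB.length then (listA, listB) else (listB, listA)

-- ===== PRECONDITION & SPEC =====
def Spec_seperateInLists (data : List (String × List (List Int))) (out : List (List Int) × List (List Int)) : Prop := out = seperateInLists_alt data
instance (data : List (String × List (List Int))) (out : List (List Int) × List (List Int)) : Decidable (Spec_seperateInLists data out) := by unfold Spec_seperateInLists; infer_instance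

-- ===== CLAIM (what is proved, stated in full; the proofs are below) =====
def Claim_equal_seperateInLists : Prop := ∀ (data : List (String × List (List Int))), Dom_seperateInLists data → Spec_seperateInLists data (seperateInLists data)

-- ===== LEMMAS AND PROOFS =====
lemma inner_eq (i : Int) (loc : List (List Int)) (p : List (List Int) × List (List Int)) :
    loc.foldl (pvStepInner i) p
      = ((if i = 0 then p.1 ++ loc else p.1), (if i = 1 then p.2 ++ loc else p.2)) := by
  induction loc generalizing p with
  | nil => simp
  | cons v t ih =>
    simp only [List.foldl_cons, pvStepInner, ih]
    split_ifs <;> simp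

lemma step_eq (p : List (List Int) × List (List Int)) (i : Int) (kv : String × List (List Int)) :
    pvStepOuter (p, i) kv
      = (((if i = 0 then p.1 ++ kv.2 else p.1), (if i = 1 then p.2 ++ kv.2 else p.2)), i + 1) := by
  simp [pvStepOuter, inner_eq]

lemma outer_ge2 (l : List (String × List (List Int)))
    (p : List (List Int) × List (List Int)) (i : Int) (h : 2 ≤ i) :
    l.foldl pvStepOuter (p, i) = (p, i + l.length) := by
  induction l generalizing p i with
  | nil => simp
  | cons kv t ih =>
    rw [List.foldl_cons, step_eq, if_neg (by omega), if_neg (by omega), Prod.mk.eta,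
      ih _ _ (by omega)]
    simp only [List.length_cons]
    congr 1
    push_cast; ring

lemma outer_one (l : List (String × List (List Int))) (la lb : List (List Int)) :
    l.foldl pvStepOuter ((la, lb), 1)
      = ((la, lb ++ (l.map Prod.snd).getD 0 []), (1 : Int) + l.length) := by
  cases l with
  | nil => simp
  | cons kv t =>
    rw [List.foldl_cons, step_eq, if_neg (by omega), if_pos rfl,
      outer_ge2 _ _ _ (by omega)]
    simp only [List.map_cons, List.getD_cons_zero, List.length_cons]
    congr 1
    push_cast; ring

-- ===== VERDICT (by name: the statement is the Claim_ definition above) =====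
theorem seperateInLists_spec : Claim_equal_seperateInLists := by
  intro data _
  unfold Spec_seperateInLists seperateInLists seperateInLists_alt
  cases data with
  | nil => rfl
  | cons kv t =>
    rw [List.foldl_cons, step_eq, if_pos rfl, if_neg (show ¬ (0 : Int) = 1 by omega),
      List.nil_append, show ((0 : Int) + 1) = 1 from rfl, outer_one]
    simp
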